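-- pv_equiv track=rewrite | github.com/ahampriyanshu/algo-ds-101 | Algorithms/Sorting_Algorithms/Strand_Sort/Strand_Sort.py | strand
-- ===== SOURCE A (Python) =====
-- def strand(arr):
--   i, s = 0, [arr.pop(0)]
--   while i < len(arr):
--     if arr[i] > s[-1]:
--       s.append(arr.pop(i))
--     else:
--       i += 1
--   return s
-- ===== SOURCE B (Python) =====
-- def strand(arr):
--     s = [arr.pop(0)]
--     rem = []
--     for x in arr:
--         if x > s[-1]:
--             s.append(x)
--         else:
--             rem.append(x)
--     arr[:] = rem
--     return s
-- ===== Notes on version B (the rewrite author's own statement) =====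
-- stated objective: faster
-- what changed: Replaces the indexed while-loop with in-place pops (each pop shifting the list) by a single pass that partitions elements into the strand s and the remaining list, then assigns arr[:] = rem.
import Mathlib
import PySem

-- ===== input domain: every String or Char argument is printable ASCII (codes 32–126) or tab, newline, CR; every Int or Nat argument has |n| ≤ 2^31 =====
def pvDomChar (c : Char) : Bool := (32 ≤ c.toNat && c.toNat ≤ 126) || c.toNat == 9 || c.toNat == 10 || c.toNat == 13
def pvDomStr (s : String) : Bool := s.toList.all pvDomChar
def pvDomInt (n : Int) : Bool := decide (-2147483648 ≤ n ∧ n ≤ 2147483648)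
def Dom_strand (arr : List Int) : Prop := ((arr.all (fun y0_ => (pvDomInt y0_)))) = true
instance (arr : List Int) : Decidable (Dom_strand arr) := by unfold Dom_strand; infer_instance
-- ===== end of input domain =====

-- B replaces A's O(n^2) indexed while-loop with in-place pops by a single O(n) pass
-- partitioning into the strand and the remainder. Both A and B mutate `arr` the same
-- way (taken elements removed); the equivalence proved here is about the RETURN value.

-- ===== PORT A =====
-- A's while loop: index i over the (shrinking) list; on a take, pop at i (i stays),
-- else i += 1. Measure arr.length - i decreases in both branches.
def strandLoopA (arr : List Int) (i : Nat) (s : List Int) : List Int :=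
  if h : i < arr.length then
    if arr[i] > (PySem.List.pyGet? s (-1)).getD 0 then
      strandLoopA (arr.eraseIdx i) i (s ++ [arr[i]])
    else
      strandLoopA arr (i + 1) s
  else s
termination_by arr.length - i
decreasing_by
  · simp [List.length_eraseIdx, h]; omega
  · omega

def strand (arr : List Int) : List Int :=
  match arr with
  | [] => []            -- arr.pop(0) raises IndexError; excluded by Pre_strand
  | a :: rest => strandLoopA rest 0 [a]

-- ===== PORT B =====
-- one pass over the tail: extend the strand when x > its last element.
-- state: `last` = s[-1], `acc` = s built in reverse.
def strandGoB (xs : List Int) (last : Int) (acc : List Int) : List Int :=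
  match xs with
  | [] => acc.reverse
  | x :: xs' => if x > last then strandGoB xs' x (x :: acc) else strandGoB xs' last acc

def strand_alt (arr : List Int) : List Int :=
  match arr with
  | [] => []
  | a :: rest => strandGoB rest a [a]

-- ===== PRECONDITION & SPEC =====
-- Pre_ excludes only the empty list, on which A raises IndexError (arr.pop(0)).
def Pre_strand (arr : List Int) : Prop := arr ≠ []
instance (arr : List Int) : Decidable (Pre_strand arr) := by unfold Pre_strand; infer_instance
def pvWitness_strand : List Int := [3, 1, 4, 1, 5]

def Spec_strand (arr : List Int) (out : List Int) : Prop := out = strand_alt arr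
instance (arr : List Int) (out : List Int) : Decidable (Spec_strand arr out) := by unfold Spec_strand; infer_instance

-- ===== CLAIM (what is proved, stated in full; the proofs are below) =====
def Claim_equal_strand : Prop := ∀ (arr : List Int), Dom_strand arr → Pre_strand arr → Spec_strand arr (strand arr)

-- ===== LEMMAS AND PROOFS =====

-- A's loop never looks at indices below i, so it equals the loop on arr.drop i.
def goDrop (xs : List Int) (s : List Int) : List Int :=
  match xs with
  | [] => s
  | x :: xs' => if x > (PySem.List.pyGet? s (-1)).getD 0 then goDrop xs' (s ++ [x]) else goDrop xs' s

lemma strandLoopA_eq_goDrop (n : Nat) (arr : List Int) (i : Nat) (s : List Int)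
    (hn : arr.length - i ≤ n) : strandLoopA arr i s = goDrop (arr.drop i) s := by
  induction n generalizing arr i s with
  | zero =>
    have : arr.length ≤ i := by omega
    rw [strandLoopA]
    simp [List.drop_eq_nil_of_le this, not_lt.mpr this, goDrop]
  | succ n ih =>
    rw [strandLoopA]
    by_cases h : i < arr.length
    case neg => simp [List.drop_eq_nil_of_le (not_lt.mp h), h, goDrop]
    · have hdrop : arr.drop i = arr[i] :: arr.drop (i + 1) := List.drop_eq_getElem_cons h
      simp only [h, dite_true]
      by_cases hc : arr[i] > (PySem.List.pyGet? s (-1)).getD 0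
      · simp only [hc, if_true]
        rw [ih _ _ _ (by simp [List.length_eraseIdx, h]; omega)]
        rw [hdrop, goDrop]
        simp only [hc, if_true]
        congr 1
        -- (arr.eraseIdx i).drop i = arr.drop (i+1)
        rw [List.eraseIdx_eq_take_drop_succ, List.drop_append]
        simp [List.length_take, Nat.min_eq_left (le_of_lt h)]
      · simp only [hc, if_false]
        rw [ih _ _ _ (by omega)]
        rw [hdrop, goDrop]
        simp only [hc, if_false]

-- the last element of a nonempty s, as A's port reads it
lemma pyGet_neg_one (s : List Int) (hs : s ≠ []) :
    (PySem.List.pyGet? s (-1)).getD 0 = s.getLast hs := by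
  rw [PySem.List.pyGet?_neg_one, List.getLast?_eq_getLast_of_ne_nil hs]
  rfl

-- B's accumulator pass computes goDrop, given acc = s.reverse and last = s.getLast
lemma goDrop_eq_goB (xs : List Int) (s : List Int) (hs : s ≠ []) :
    goDrop xs s = strandGoB xs (s.getLast hs) s.reverse := by
  induction xs generalizing s with
  | nil => simp [goDrop, strandGoB]
  | cons x xs' ih =>
    rw [goDrop, strandGoB, pyGet_neg_one s hs]
    by_cases hc : x > s.getLast hs
    · simp only [hc, if_true]
      rw [ih (s ++ [x]) (by simp)]
      simp
    · simp only [hc, if_false]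
      exact ih s hs

theorem strand_spec : Claim_equal_strand := by
  intro arr _ hpre
  unfold Spec_strand
  match arr with
  | [] => exact absurd rfl hpre
  | a :: rest =>
    show strandLoopA rest 0 [a] = strandGoB rest a [a]
    rw [strandLoopA_eq_goDrop rest.length rest 0 [a] (by omega)]
    simpa using goDrop_eq_goB rest [a] (by simp)
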